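-- pv_equiv track=rewrite | github.com/bzpwp/algorithm | AtCoder/ガイドライン/codes/dp/部分列dp.py | calcNext
-- ===== SOURCE A (Python) =====
-- def calcNext(S: str) -> list:
--     n = len(S)
--     res = [[n] * 26 for _ in range(n + 1)]
--     for i in range(n - 1, -1, -1):
--         for j in range(26):
--             res[i][j] = res[i + 1][j]
--         res[i][ord(S[i]) - ord('a')] = i
--     return res
-- ===== SOURCE B (Python) =====
-- def calcNext(S: str) -> list:
--     n = len(S)
--     occ = [[] for _ in range(26)]
--     for i, c in enumerate(S):
--         occ[ord(c) - ord('a')].append(i)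
--     res = []
--     for i in range(n + 1):
--         row = []
--         for j in range(26):
--             P = occ[j]
--             lo, hi = 0, len(P)
--             while lo < hi:
--                 mid = (lo + hi) // 2
--                 if P[mid] < i:
--                     lo = mid + 1
--                 else:
--                     hi = mid
--             row.append(P[lo] if lo < len(P) else n)
--         res.append(row)
--     return res
-- ===== Notes on version B (the rewrite author's own statement) =====
-- stated objective: alternative
-- what changed: B abandons the backward row-copy DP entirely: it first indexes the string into 26 per-letter occurrence-position lists in one forward pass, then fills each cell res[i][j] by a hand-written binary search (lower bound) for the first occurrence >= i in column j's list.
import Mathlib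
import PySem

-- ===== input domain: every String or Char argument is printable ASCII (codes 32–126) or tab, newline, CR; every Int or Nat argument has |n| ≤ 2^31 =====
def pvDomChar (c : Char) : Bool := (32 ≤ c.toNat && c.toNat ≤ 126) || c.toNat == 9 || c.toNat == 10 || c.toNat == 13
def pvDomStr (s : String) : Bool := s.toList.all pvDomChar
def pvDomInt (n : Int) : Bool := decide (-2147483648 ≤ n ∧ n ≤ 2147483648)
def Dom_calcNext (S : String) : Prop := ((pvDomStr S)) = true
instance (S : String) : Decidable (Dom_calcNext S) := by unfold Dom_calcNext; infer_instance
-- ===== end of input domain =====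

-- B replaces A's backward row-copy DP by a different algorithm: one forward pass builds
-- 26 per-letter occurrence-position lists, then every cell is answered by a hand-written
-- binary search (lower bound) in its column's list (objective: alternative, not faster).

-- ===== PORT A =====
-- one iteration of A's outer loop: copy row i+1 into row i, then record i
def calcNextStep (cs : List Char) (res : List (List Int)) (i : Int) : List (List Int) :=
  let res1 := (PySem.List.pyRange 0 26 1).foldl
    (fun r j => PySem.List.pySetD r i
      (PySem.List.pySetD (PySem.List.pyGetD r i [])
        j (PySem.List.pyGetD (PySem.List.pyGetD r (i + 1) []) j 0))) res
  PySem.List.pySetD res1 i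
    (PySem.List.pySetD (PySem.List.pyGetD res1 i [])
      (((PySem.List.pyGetD cs i ' ').toNat : Int) - 97) i)

def calcNext (S : String) : List (List Int) :=
  let cs := S.toList
  let n : Int := (cs.length : Int)
  let res := (PySem.List.pyRange 0 (n + 1) 1).map (fun _ => List.replicate 26 n)
  (PySem.List.pyRange (n - 1) (-1) (-1)).foldl (calcNextStep cs) res

-- ===== PORT B =====
-- Source B's hand-written while-loop lower-bound binary search (lo, hi stay ≥ 0, so Nat);
-- the loop runs as long as lo < hi and each step shrinks hi - lo, so fuel = hi - lo
-- makes the same iteration structurally recursive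
def lowerBAux (P : List Int) (x : Int) : Nat → Nat → Nat → Nat
  | 0, lo, _ => lo
  | fuel + 1, lo, hi =>
    if lo < hi then
      let mid := (lo + hi) / 2
      if PySem.List.pyGetD P (mid : Int) 0 < x then lowerBAux P x fuel (mid + 1) hi
      else lowerBAux P x fuel lo mid
    else lo

def lowerB (P : List Int) (x : Int) (lo hi : Nat) : Nat :=
  lowerBAux P x (hi - lo) lo hi

def calcNext_alt (S : String) : List (List Int) :=
  let cs := S.toList
  let n : Int := (cs.length : Int)
  let occ : List (List Int) :=
    (PySem.List.enumerate cs 0).foldl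
      (fun occ ic =>
        PySem.List.pySetD occ ((ic.2.toNat : Int) - 97)
          (PySem.List.pyGetD occ ((ic.2.toNat : Int) - 97) [] ++ [ic.1]))
      ((PySem.List.pyRange 0 26 1).map (fun _ => []))
  (PySem.List.pyRange 0 (n + 1) 1).map (fun i =>
    (PySem.List.pyRange 0 26 1).map (fun j =>
      let P := PySem.List.pyGetD occ j []
      let lo := lowerB P i 0 P.length
      if lo < P.length then PySem.List.pyGetD P (lo : Int) 0 else n))

-- ===== PRECONDITION & SPEC =====
-- Pre_ admits exactly the strings on which A returns: every character has code in
-- [71, 122], so that A's (possibly negative) row index ord(c)-97 is in [-26, 25];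
-- on any other character A raises IndexError (and so does B, on its occ index).
-- the 52 accepted characters, codes 71..122 ('G'..'z')
def pvUpperZone : String := "GHIJKLMNOPQRSTUVWXYZ[\\]^_`"
def pvLowerZone : String := "abcdefghijklmnopqrstuvwxyz"
def Pre_calcNext (S : String) : Prop :=
  (S.toList.all (fun c => (pvUpperZone ++ pvLowerZone).toList.contains c)) = true
instance (S : String) : Decidable (Pre_calcNext S) := by unfold Pre_calcNext; infer_instance
def pvWitness_calcNext : String := "ab"

def Spec_calcNext (S : String) (out : List (List Int)) : Prop := out = calcNext_alt S
instance (S : String) (out : List (List Int)) : Decidable (Spec_calcNext S out) := by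
  unfold Spec_calcNext; infer_instance

-- ===== CLAIM (what is proved, stated in full; the proofs are below) =====
def Claim_equal_calcNext : Prop :=
  ∀ (S : String), Dom_calcNext S → Pre_calcNext S → Spec_calcNext S (calcNext S)

-- ===== LEMMAS AND PROOFS =====

-- next-occurrence specification: first position ≥ i whose character matches m, else n
def colSpec (m : Char → Bool) (cs : List Char) (i : Nat) : Int :=
  match (cs.drop i).findIdx? m with
  | some k => ((i + k : Nat) : Int)
  | none => (cs.length : Int)

theorem colSpec_stop (m : Char → Bool) (cs : List Char) (i : Nat) (h : cs.length ≤ i) :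
    colSpec m cs i = (cs.length : Int) := by
  simp [colSpec, List.drop_eq_nil_of_le h]

theorem colSpec_succ (m : Char → Bool) (cs : List Char) (i : Nat) (h : i < cs.length) :
    colSpec m cs i = if m cs[i] then (i : Int) else colSpec m cs (i + 1) := by
  have hd : cs.drop i = cs[i] :: cs.drop (i + 1) := List.drop_eq_getElem_cons h
  unfold colSpec
  rw [hd, List.findIdx?_cons]
  by_cases hm : m cs[i] <;> simp [hm]
  cases hf : (cs.drop (i + 1)).findIdx? m with
  | none => simp
  | some k => simp; omega

theorem map_range_set {α : Type} (f : Nat → α) (N e : Nat) (v : α) (he : e < N) :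
    ((List.range N).map f).set e v
      = (List.range N).map (fun r => if r = e then v else f r) := by
  apply List.ext_getElem (by simp)
  intro k h1 h2
  simp at h1
  rw [List.getElem_set]
  simp only [List.getElem_map, List.getElem_range]
  rcases eq_or_ne k e with rfl | hne
  · simp
  · simp [hne, Ne.symm hne]

theorem map_range_congr {α : Type} (f g : Nat → α) (N : Nat)
    (h : ∀ r, r < N → f r = g r) : (List.range N).map f = (List.range N).map g := by
  apply List.map_congr_left
  intro r hr
  exact h r (List.mem_range.mp hr)

theorem pySetD_neg {α : Type} (xs : List α) (k : Nat) (v : α) (h1 : 0 < k)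
    (h2 : k ≤ xs.length) :
    PySem.List.pySetD xs (-(k : Int)) v = xs.set (xs.length - k) v := by
  unfold PySem.List.pySetD PySem.List.pySet? PySem.List.pyIdx?
  rw [if_neg (by omega), if_pos (by omega)]
  simp only [Option.map_some, Option.getD_some]
  congr 1
  omega

theorem getD_nat {α : Type} (xs : List α) (n : Nat) (d : α) (h : n < xs.length) :
    PySem.List.pyGetD xs (n : Int) d = xs[n] := by
  simp [PySem.List.pyGetD_natCast, List.getElem?_eq_getElem h]

theorem setD_nat {α : Type} (xs : List α) (n : Nat) (v : α) :
    PySem.List.pySetD xs (n : Int) v = xs.set n v := by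
  simp [PySem.List.pySetD_natCast]

-- ---- A-side: the table A builds row by row ----

def mixRow (a b : List Int) (j0 : Nat) : List Int :=
  (List.range 26).map (fun j => if j < j0 then a.getD j 0 else b.getD j 0)

theorem copy_fold_aux (i : Nat) : ∀ (k : Nat) (j0 : Nat), j0 + k = 26 →
    ∀ (r : List (List Int)) (hi : i + 1 < r.length)
      (h26 : r[i].length = 26) (h26' : r[i + 1].length = 26),
    (PySem.List.pyRange (j0 : Int) 26 1).foldl
      (fun t j => PySem.List.pySetD t (i : Int)
        (PySem.List.pySetD (PySem.List.pyGetD t (i : Int) [])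
          j (PySem.List.pyGetD (PySem.List.pyGetD t ((i : Int) + 1) []) j 0))) r
    = r.set i (mixRow r[i] r[i + 1] j0) := by
  intro k
  induction k with
  | zero =>
    intro j0 hj r hi h26 h26'
    have hj26 : j0 = 26 := by omega
    subst hj26
    rw [PySem.List.pyRange_one_eq_nil (by norm_num)]
    simp only [List.foldl_nil]
    have hmix : mixRow r[i] r[i + 1] 26 = r[i] := by
      apply List.ext_getElem (by simp [mixRow, h26])
      intro j h1 h2
      simp only [mixRow, List.getElem_map, List.getElem_range,
        List.length_map, List.length_range] at h1 ⊢
      rw [if_pos h1, List.getD_eq_getElem _ _ (by omega)]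
    rw [hmix, List.set_getElem_self]
  | succ k ih =>
    intro j0 hj r hi h26 h26'
    have hlt : (j0 : Int) < 26 := by omega
    rw [PySem.List.pyRange_one_cons hlt]
    simp only [List.foldl_cons]
    have hcast : ((i : Int) + 1) = ((i + 1 : Nat) : Int) := by push_cast; ring
    have hgi1 : PySem.List.pyGetD r ((i : Int) + 1) [] = r[i + 1] := by
      rw [hcast, getD_nat r (i + 1) [] hi]
    rw [getD_nat r i [] (by omega), hgi1,
      getD_nat (r[i+1]) j0 0 (by omega), setD_nat, setD_nat]
    set r' := r.set i (r[i].set j0 (r[i + 1][j0]'(by omega))) with hr'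
    have hlen : r'.length = r.length := by simp [hr']
    have hi' : i + 1 < r'.length := by omega
    have hri' : r'[i]'(by omega) = r[i].set j0 (r[i + 1][j0]'(by omega)) := by
      simp [hr']
    have hri1' : r'[i + 1]'(by omega) = r[i + 1] := by
      simp only [hr']
      rw [List.getElem_set_ne (by omega)]
    have hcast2 : ((j0 : Int) + 1) = ((j0 + 1 : Nat) : Int) := by push_cast; ring
    rw [hcast2, ih (j0 + 1) (by omega) r' hi' (by rw [hri']; simp [h26]) (by rw [hri1']; exact h26')]
    rw [hri', hri1', hr', List.set_set]
    congr 1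
    have hslen : (r[i].set j0 (r[i + 1][j0]'(by omega))).length = 26 := by
      rw [List.length_set]; exact h26
    apply List.ext_getElem (by simp [mixRow])
    intro j h1 h2
    simp only [mixRow, List.length_map, List.length_range] at h1
    simp only [mixRow, List.getElem_map, List.getElem_range]
    by_cases hj2 : j < j0
    · rw [if_pos (by omega), if_pos hj2, List.getD_eq_getElem _ _ (by omega),
        List.getD_eq_getElem _ _ (by omega), List.getElem_set_ne (by omega)]
    · by_cases hj1 : j < j0 + 1
      · have hje : j = j0 := by omega
        subst hje
        rw [if_pos hj1, if_neg (by omega), List.getD_eq_getElem _ _ (by omega),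
          List.getElem_set_self (by omega), List.getD_eq_getElem _ _ (by omega)]
      · rw [if_neg hj1, if_neg (by omega)]

-- the column a character lands in, after Python's negative-index wrap into [0, 26)
def effCol (c : Char) : Nat := if 97 ≤ c.toNat then c.toNat - 97 else c.toNat - 71

def rowA (cs : List Char) (i : Nat) : List Int :=
  (List.range 26).map (fun j => colSpec (fun c => effCol c == j) cs i)

def midA (cs : List Char) (i : Nat) : List (List Int) :=
  (List.range (cs.length + 1)).map
    (fun r => if i ≤ r then rowA cs r else List.replicate 26 (cs.length : Int))

theorem length_rowA (cs : List Char) (i : Nat) : (rowA cs i).length = 26 := by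
  simp [rowA]

theorem setWrap_row (cs : List Char) (i : Nat) (h : i < cs.length)
    (hlo : 71 ≤ cs[i].toNat) (hhi : cs[i].toNat ≤ 122) :
    PySem.List.pySetD (rowA cs (i + 1)) (((cs[i].toNat : Int)) - 97) (i : Int)
      = rowA cs i := by
  have he : effCol cs[i] < 26 := by
    unfold effCol; split <;> omega
  have hset : PySem.List.pySetD (rowA cs (i + 1)) (((cs[i].toNat : Int)) - 97) (i : Int)
      = (rowA cs (i + 1)).set (effCol cs[i]) (i : Int) := by
    by_cases h97 : 97 ≤ cs[i].toNat
    · have hc : ((cs[i].toNat : Int)) - 97 = ((cs[i].toNat - 97 : Nat) : Int) := by omega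
      rw [hc, setD_nat]
      unfold effCol
      rw [if_pos h97]
    · have hk : ((cs[i].toNat : Int)) - 97 = -(((97 - cs[i].toNat : Nat)) : Int) := by omega
      rw [hk, pySetD_neg _ _ _ (by omega) (by rw [length_rowA]; omega)]
      rw [length_rowA]
      unfold effCol
      rw [if_neg h97]
      congr 1
      omega
  rw [hset]
  unfold rowA
  rw [map_range_set _ _ _ _ he]
  apply map_range_congr
  intro j hj
  rw [colSpec_succ _ cs i h]
  by_cases hje : j = effCol cs[i]
  · subst hje
    rw [if_pos rfl, if_pos (by simp)]
  · rw [if_neg hje, if_neg (by simp [Ne.symm hje])]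

theorem midA_step (cs : List Char) (i : Nat) (h : i < cs.length)
    (hlo : 71 ≤ cs[i].toNat) (hhi : cs[i].toNat ≤ 122) :
    calcNextStep cs (midA cs (i + 1)) (i : Int) = midA cs i := by
  have hlenm : (midA cs (i + 1)).length = cs.length + 1 := by simp [midA]
  have hi1 : i + 1 < (midA cs (i + 1)).length := by omega
  have hgetm : ∀ (r : Nat) (hr : r < cs.length + 1),
      (midA cs (i + 1))[r]'(by omega)
        = if i + 1 ≤ r then rowA cs r else List.replicate 26 (cs.length : Int) := by
    intro r hr
    simp [midA]
  have h26i : ((midA cs (i + 1))[i]'(by omega)).length = 26 := by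
    rw [hgetm i (by omega)]
    split <;> simp [length_rowA]
  have h26i1 : ((midA cs (i + 1))[i + 1]'(by omega)).length = 26 := by
    rw [hgetm (i + 1) (by omega)]
    split <;> simp [length_rowA]
  unfold calcNextStep
  show PySem.List.pySetD ((PySem.List.pyRange 0 26 1).foldl _ _) _ _ = _
  have hcf := copy_fold_aux i 26 0 rfl (midA cs (i + 1)) hi1 h26i h26i1
  rw [Nat.cast_zero] at hcf
  rw [hcf]
  have hmix : mixRow ((midA cs (i + 1))[i]'(by omega)) ((midA cs (i + 1))[i + 1]'(by omega)) 0
      = rowA cs (i + 1) := by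
    apply List.ext_getElem (by simp [mixRow, length_rowA])
    intro j h1 h2
    simp only [mixRow, List.getElem_map, List.getElem_range, List.length_map,
      List.length_range] at h1 ⊢
    have hrow : (midA cs (i + 1))[i + 1]'(by omega) = rowA cs (i + 1) := by
      rw [hgetm (i + 1) (by omega)]
      rw [if_pos le_rfl]
    rw [if_neg (by omega), List.getD_eq_getElem _ _ (by omega)]
    simp only [hrow]
  rw [hmix]
  set r1 := (midA cs (i + 1)).set i (rowA cs (i + 1)) with hr1
  have hlen1 : r1.length = cs.length + 1 := by simp [hr1, hlenm]
  have hg1 : PySem.List.pyGetD r1 (i : Int) [] = rowA cs (i + 1) := by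
    rw [getD_nat r1 i [] (by omega)]
    simp [hr1]
  have hgc : PySem.List.pyGetD cs (i : Int) ' ' = cs[i] := getD_nat cs i ' ' h
  rw [hg1, hgc, setWrap_row cs i h hlo hhi, setD_nat, hr1, List.set_set]
  unfold midA
  rw [map_range_set _ _ _ _ (by omega)]
  apply map_range_congr
  intro r hr
  by_cases hri : r = i
  · subst hri
    rw [if_pos rfl, if_pos le_rfl]
  · rw [if_neg hri]
    by_cases hle : i ≤ r
    · rw [if_pos (by omega), if_pos hle]
    · rw [if_neg (by omega), if_neg hle]

theorem rowA_last (cs : List Char) :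
    rowA cs cs.length = List.replicate 26 (cs.length : Int) := by
  apply List.ext_getElem (by simp [rowA])
  intro j h1 h2
  simp only [rowA, List.getElem_map, List.getElem_range, List.getElem_replicate]
  exact colSpec_stop _ cs cs.length le_rfl

theorem midA_last (cs : List Char) :
    midA cs cs.length
      = (PySem.List.pyRange 0 ((cs.length : Int) + 1) 1).map
          (fun _ => List.replicate 26 (cs.length : Int)) := by
  have hc : ((cs.length : Int) + 1) = ((cs.length + 1 : Nat) : Int) := by push_cast; ring
  rw [hc, PySem.List.pyRange_zero_nat, List.map_map]
  unfold midA
  apply map_range_congr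
  intro r hr
  by_cases hre : cs.length ≤ r
  · have : r = cs.length := by omega
    subst this
    rw [if_pos le_rfl, rowA_last]
    rfl
  · rw [if_neg hre]
    rfl

theorem foldA_inv (cs : List Char) (hpre : ∀ c ∈ cs, 71 ≤ c.toNat ∧ c.toNat ≤ 122) :
    ∀ i, i ≤ cs.length →
      (PySem.List.pyRange ((i : Int) - 1) (-1) (-1)).foldl (calcNextStep cs) (midA cs i)
        = midA cs 0 := by
  intro i
  induction i with
  | zero =>
    intro _
    rw [show ((0 : Nat) : Int) - 1 = -1 from rfl,
      PySem.List.pyRange_neg_one_eq_nil le_rfl]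
    rfl
  | succ i ih =>
    intro hle
    have hc : ((i + 1 : Nat) : Int) - 1 = (i : Int) := by push_cast; ring
    rw [hc, PySem.List.pyRange_neg_one_cons (by omega)]
    simp only [List.foldl_cons]
    have hchar := hpre (cs[i]'(by omega)) (by exact List.getElem_mem _)
    rw [midA_step cs i (by omega) hchar.1 hchar.2]
    exact ih (by omega)

theorem calcNext_char (S : String)
    (hpre : ∀ c ∈ S.toList, 71 ≤ c.toNat ∧ c.toNat ≤ 122) :
    calcNext S = midA S.toList 0 := by
  simp only [calcNext]
  rw [← midA_last]
  exact foldA_inv S.toList hpre S.toList.length le_rfl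

-- ---- B-side: occurrence lists and binary search ----

-- positions (in order) of the characters landing in column j
def occSpec (cs : List Char) (j : Nat) : List Int :=
  ((List.range cs.length).filter (fun k => effCol (cs.getD k ' ') == j)).map
    (fun k => ((k : Nat) : Int))

theorem occ_step (A : Nat → List Int) (c : Char) (x : Int)
    (hlo : 71 ≤ c.toNat) (hhi : c.toNat ≤ 122) :
    PySem.List.pySetD ((List.range 26).map A) ((c.toNat : Int) - 97)
      (PySem.List.pyGetD ((List.range 26).map A) ((c.toNat : Int) - 97) [] ++ [x])
    = (List.range 26).map (fun j => if j = effCol c then A (effCol c) ++ [x] else A j) := by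
  have he : effCol c < 26 := by unfold effCol; split <;> omega
  have hlen : ((List.range 26).map A).length = 26 := by simp
  have hget : PySem.List.pyGetD ((List.range 26).map A) ((c.toNat : Int) - 97) []
      = A (effCol c) := by
    by_cases h97 : 97 ≤ c.toNat
    · have hc : ((c.toNat : Int)) - 97 = ((c.toNat - 97 : Nat) : Int) := by omega
      rw [hc, getD_nat _ _ _ (by omega)]
      simp only [List.getElem_map, List.getElem_range]
      unfold effCol
      rw [if_pos h97]
    · have hk : ((c.toNat : Int)) - 97 = -(((97 - c.toNat : Nat)) : Int) := by omega
      rw [hk, PySem.List.pyGetD_neg_natCast _ _ _ (by omega) (by rw [hlen]; omega)]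
      simp only [List.getElem_map, List.getElem_range]
      rw [hlen]
      unfold effCol
      rw [if_neg h97]
      congr 1
      omega
  rw [hget]
  have hset : PySem.List.pySetD ((List.range 26).map A) ((c.toNat : Int) - 97)
      (A (effCol c) ++ [x]) = ((List.range 26).map A).set (effCol c) (A (effCol c) ++ [x]) := by
    by_cases h97 : 97 ≤ c.toNat
    · have hc : ((c.toNat : Int)) - 97 = ((c.toNat - 97 : Nat) : Int) := by omega
      rw [hc, setD_nat]
      unfold effCol
      rw [if_pos h97]
    · have hk : ((c.toNat : Int)) - 97 = -(((97 - c.toNat : Nat)) : Int) := by omega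
      rw [hk, pySetD_neg _ _ _ (by omega) (by rw [hlen]; omega)]
      rw [hlen]
      unfold effCol
      rw [if_neg h97]
      congr 1
      omega
  rw [hset, map_range_set _ _ _ _ he]

theorem pos_cons (c : Char) (t : List Char) (s : Nat) (j : Nat) :
    ((List.range (t.length + 1)).filter
        (fun k => effCol ((c :: t).getD k ' ') == j)).map (fun k => ((s + k : Nat) : Int))
    = (if j = effCol c then [(s : Int)] else [])
      ++ ((List.range t.length).filter (fun k => effCol (t.getD k ' ') == j)).map
          (fun k => ((s + 1 + k : Nat) : Int)) := by
  rw [List.range_succ_eq_map, List.filter_cons]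
  have hmap : (List.filter (fun k => effCol ((c :: t).getD k ' ') == j)
        ((List.range t.length).map (· + 1)))
      = ((List.range t.length).filter (fun k => effCol (t.getD k ' ') == j)).map (· + 1) := by
    rw [List.filter_map]
    congr 1
  by_cases hc : effCol c = j
  · rw [if_pos (by simpa using hc), if_pos (by omega)]
    simp only [List.map_cons, hmap, List.map_map]
    rw [Nat.add_zero, List.singleton_append]
    congr 1
    apply List.map_congr_left
    intro k _
    show ((s + (k + 1) : Nat) : Int) = ((s + 1 + k : Nat) : Int)
    congr 1
    omega
  · rw [if_neg (by simpa using hc), if_neg (by omega)]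
    simp only [hmap, List.map_map, List.nil_append]
    apply List.map_congr_left
    intro k _
    show ((s + (k + 1) : Nat) : Int) = ((s + 1 + k : Nat) : Int)
    congr 1
    omega

theorem occ_fold (cs : List Char) :
    ∀ (s : Nat) (A : Nat → List Int),
      (∀ c ∈ cs, 71 ≤ c.toNat ∧ c.toNat ≤ 122) →
      (PySem.List.enumerate cs (s : Int)).foldl
        (fun occ ic =>
          PySem.List.pySetD occ ((ic.2.toNat : Int) - 97)
            (PySem.List.pyGetD occ ((ic.2.toNat : Int) - 97) [] ++ [ic.1]))
        ((List.range 26).map A)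
      = (List.range 26).map (fun j =>
          A j ++ ((List.range cs.length).filter (fun k => effCol (cs.getD k ' ') == j)).map
            (fun k => ((s + k : Nat) : Int))) := by
  induction cs with
  | nil =>
    intro s A _
    simp [PySem.List.enumerate]
  | cons c t ih =>
    intro s A hpre
    rw [PySem.List.enumerate_cons]
    simp only [List.foldl_cons]
    have hc := hpre c (by simp)
    rw [occ_step A c (s : Int) hc.1 hc.2]
    have hcast : ((s : Int) + 1) = ((s + 1 : Nat) : Int) := by push_cast; ring
    rw [hcast, ih (s + 1) _ (fun c' hc' => hpre c' (by simp [hc']))]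
    apply map_range_congr
    intro j hj
    rw [show (c :: t).length = t.length + 1 from rfl, pos_cons c t s j]
    by_cases hje : j = effCol c
    · rw [if_pos hje, if_pos hje, hje, List.append_assoc, List.singleton_append]
    · rw [if_neg hje, if_neg hje, List.nil_append]

theorem sorted_getD_lt (P : List Int) (hP : P.Pairwise (· < ·)) (a b : Nat)
    (hab : a < b) (hb : b < P.length) : P.getD a 0 < P.getD b 0 := by
  rw [List.getD_eq_getElem _ _ (by omega), List.getD_eq_getElem _ _ hb]
  exact List.pairwise_iff_getElem.mp hP a b (by omega) hb hab

theorem lowerBAux_succ (P : List Int) (x : Int) (fuel lo hi : Nat) :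
    lowerBAux P x (fuel + 1) lo hi
      = if lo < hi then
          (if PySem.List.pyGetD P (((lo + hi) / 2 : Nat) : Int) 0 < x
            then lowerBAux P x fuel ((lo + hi) / 2 + 1) hi
            else lowerBAux P x fuel lo ((lo + hi) / 2))
        else lo := rfl

theorem lowerBAux_spec (P : List Int) (x : Int) (hP : P.Pairwise (· < ·)) :
    ∀ (fuel lo hi : Nat), hi - lo ≤ fuel → lo ≤ hi → hi ≤ P.length →
      (∀ k, k < lo → P.getD k 0 < x) →
      (∀ k, hi ≤ k → k < P.length → x ≤ P.getD k 0) →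
      (∀ k, k < lowerBAux P x fuel lo hi → P.getD k 0 < x) ∧
      (∀ k, lowerBAux P x fuel lo hi ≤ k → k < P.length → x ≤ P.getD k 0) ∧
      lowerBAux P x fuel lo hi ≤ P.length := by
  intro fuel
  induction fuel with
  | zero =>
    intro lo hi hf hlohi hhi hlow hhigh
    refine ⟨hlow, ?_, ?_⟩
    · intro k hk hk2
      have hk' : lo ≤ k := hk
      exact hhigh k (by omega) hk2
    · show lo ≤ P.length
      omega
  | succ fuel ih =>
    intro lo hi hf hlohi hhi hlow hhigh
    rw [lowerBAux_succ]
    by_cases hlt : lo < hi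
    · rw [if_pos hlt]
      have hmid1 : lo ≤ (lo + hi) / 2 := by omega
      have hmid2 : (lo + hi) / 2 < hi := by omega
      have hmlen : (lo + hi) / 2 < P.length := by omega
      rw [getD_nat P ((lo + hi) / 2) 0 hmlen, ← List.getD_eq_getElem P 0 hmlen]
      by_cases hcmp : P.getD ((lo + hi) / 2) 0 < x
      · rw [if_pos hcmp]
        refine ih ((lo + hi) / 2 + 1) hi (by omega) (by omega) hhi ?_ hhigh
        intro k hk
        rcases Nat.lt_or_ge k ((lo + hi) / 2) with hk2 | hk2
        · exact lt_trans (sorted_getD_lt P hP k _ hk2 hmlen) hcmp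
        · have : k = (lo + hi) / 2 := by omega
          rw [this]; exact hcmp
      · rw [if_neg hcmp]
        refine ih lo ((lo + hi) / 2) (by omega) (by omega) (by omega) hlow ?_
        intro k hk hklen
        rcases Nat.lt_or_ge ((lo + hi) / 2) k with hk2 | hk2
        · exact le_of_lt (lt_of_le_of_lt (le_of_not_gt hcmp)
            (sorted_getD_lt P hP _ k hk2 hklen))
        · have : k = (lo + hi) / 2 := by omega
          rw [this]; exact le_of_not_gt hcmp
    · rw [if_neg hlt]
      exact ⟨hlow, fun k hk hk2 => hhigh k (by omega) hk2, by
        show lo ≤ P.length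
        omega⟩

theorem lowerB_spec (P : List Int) (x : Int) (hP : P.Pairwise (· < ·)) :
    (∀ k, k < lowerB P x 0 P.length → P.getD k 0 < x) ∧
    (∀ k, lowerB P x 0 P.length ≤ k → k < P.length → x ≤ P.getD k 0) ∧
    lowerB P x 0 P.length ≤ P.length :=
  lowerBAux_spec P x hP (P.length - 0) 0 P.length le_rfl (by omega) le_rfl
    (by intro k hk; omega) (fun k hk hk2 => absurd hk2 (by omega))

theorem occSpec_pairwise (cs : List Char) (j : Nat) :
    (occSpec cs j).Pairwise (· < ·) := by
  unfold occSpec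
  rw [List.pairwise_map]
  exact ((List.pairwise_lt_range).filter _).imp (by intro a b h; exact_mod_cast h)

theorem mem_occSpec (cs : List Char) (j : Nat) (x : Int) :
    x ∈ occSpec cs j ↔ ∃ k : Nat, k < cs.length ∧ effCol (cs.getD k ' ') = j ∧ x = (k : Int) := by
  simp only [occSpec, List.mem_map, List.mem_filter, List.mem_range, beq_iff_eq]
  constructor
  · rintro ⟨k, ⟨hk, hek⟩, rfl⟩
    exact ⟨k, hk, hek, rfl⟩
  · rintro ⟨k, hk, hek, rfl⟩
    exact ⟨k, ⟨hk, hek⟩, rfl⟩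

theorem colSpec_min (m : Char → Bool) (cs : List Char) :
    ∀ (d i k : Nat), k - i = d → i ≤ k → k < cs.length → m (cs.getD k ' ') = true →
      (∀ k', i ≤ k' → k' < k → m (cs.getD k' ' ') = false) →
      colSpec m cs i = (k : Int) := by
  intro d
  induction d with
  | zero =>
    intro i k hd hik hk hm _
    have : i = k := by omega
    subst this
    rw [colSpec_succ m cs i hk, if_pos (by rw [← List.getD_eq_getElem cs ' ' hk]; exact hm)]
  | succ d ihd =>
    intro i k hd hik hk hm hmin
    rw [colSpec_succ m cs i (by omega),
      if_neg (by rw [← List.getD_eq_getElem cs ' ' (by omega)]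
                 exact ne_true_of_eq_false (hmin i le_rfl (by omega)))]
    exact ihd (i + 1) k (by omega) (by omega) hk hm (fun k' h1 h2 => hmin k' (by omega) h2)

theorem colSpec_none (m : Char → Bool) (cs : List Char) :
    ∀ (d i : Nat), cs.length - i = d →
      (∀ k, i ≤ k → k < cs.length → m (cs.getD k ' ') = false) →
      colSpec m cs i = (cs.length : Int) := by
  intro d
  induction d with
  | zero =>
    intro i hd _
    exact colSpec_stop m cs i (by omega)
  | succ d ihd =>
    intro i hd hnone
    rw [colSpec_succ m cs i (by omega),
      if_neg (by rw [← List.getD_eq_getElem cs ' ' (by omega)]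
                 exact ne_true_of_eq_false (hnone i le_rfl (by omega)))]
    exact ihd (i + 1) (by omega) (fun k h1 h2 => hnone k (by omega) h2)

theorem cell_eq (cs : List Char) (j : Nat) (i : Nat) :
    (if lowerB (occSpec cs j) (i : Int) 0 (occSpec cs j).length < (occSpec cs j).length
      then (occSpec cs j).getD (lowerB (occSpec cs j) (i : Int) 0 (occSpec cs j).length) 0
      else (cs.length : Int))
    = colSpec (fun c => effCol c == j) cs i := by
  set P := occSpec cs j with hPdef
  have hP : P.Pairwise (· < ·) := occSpec_pairwise cs j
  obtain ⟨hlow, hhigh, hrle⟩ := lowerB_spec P (i : Int) hP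
  set r := lowerB P (i : Int) 0 P.length with hrdef
  by_cases hr : r < P.length
  · rw [if_pos hr]
    have hmem : P.getD r 0 ∈ P := by
      rw [List.getD_eq_getElem _ _ hr]
      exact List.getElem_mem hr
    obtain ⟨k, hk, hek, hkv⟩ := (mem_occSpec cs j _).mp hmem
    rw [hkv]
    refine (colSpec_min _ cs (k - i) i k rfl ?_ hk (by simp only [beq_iff_eq]; exact hek) ?_).symm
    · have := hhigh r le_rfl hr
      rw [hkv] at this
      omega
    · intro k' h1 h2
      by_contra hmk'
      have hmem' : ((k' : Nat) : Int) ∈ P := by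
        rw [mem_occSpec]
        refine ⟨k', by omega, ?_, rfl⟩
        simp only [Bool.not_eq_false, beq_iff_eq] at hmk'
        exact hmk'
      obtain ⟨s, hs, hsv⟩ := List.getElem_of_mem hmem'
      rcases Nat.lt_or_ge s r with hsr | hsr
      · have := hlow s hsr
        rw [List.getD_eq_getElem _ _ hs, hsv] at this
        omega
      · have hle2 : P.getD r 0 ≤ P.getD s 0 := by
          rcases Nat.lt_or_ge r s with h3 | h3
          · exact le_of_lt (sorted_getD_lt P hP r s h3 hs)
          · have : r = s := by omega
            rw [this]
        rw [List.getD_eq_getElem _ _ hs, hsv, hkv] at hle2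
        omega
  · rw [if_neg hr]
    refine (colSpec_none _ cs (cs.length - i) i rfl ?_).symm
    intro k h1 h2
    by_contra hmk
    have hmem' : ((k : Nat) : Int) ∈ P := by
      rw [mem_occSpec]
      refine ⟨k, h2, ?_, rfl⟩
      simp only [Bool.not_eq_false, beq_iff_eq] at hmk
      exact hmk
    obtain ⟨s, hs, hsv⟩ := List.getElem_of_mem hmem'
    have := hlow s (by omega)
    rw [List.getD_eq_getElem _ _ hs, hsv] at this
    omega

theorem calcNext_alt_char (S : String)
    (hpre : ∀ c ∈ S.toList, 71 ≤ c.toNat ∧ c.toNat ≤ 122) :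
    calcNext_alt S
      = (List.range (S.toList.length + 1)).map (fun r => rowA S.toList r) := by
  simp only [calcNext_alt]
  set cs := S.toList with hcs
  rw [show (26 : Int) = ((26 : Nat) : Int) from by norm_num, PySem.List.pyRange_zero_nat,
    show ((cs.length : Int) + 1) = ((cs.length + 1 : Nat) : Int) from by push_cast; ring,
    PySem.List.pyRange_zero_nat]
  have hinit : List.map (fun _ => ([] : List Int))
      (List.map (fun k : Nat => (k : Int)) (List.range 26))
      = List.map (fun _ => ([] : List Int)) (List.range 26) := by
    rw [List.map_map]
    rfl
  rw [hinit]
  have hocc := occ_fold cs 0 (fun _ => ([] : List Int)) hpre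
  rw [Nat.cast_zero] at hocc
  rw [hocc]
  have e1 : List.map (fun j =>
        (fun _ => ([] : List Int)) j
          ++ List.map (fun k => ((0 + k : Nat) : Int))
              (List.filter (fun k => effCol (cs.getD k ' ') == j) (List.range cs.length)))
        (List.range 26)
      = List.map (fun j => occSpec cs j) (List.range 26) := by
    apply map_range_congr
    intro j hj
    simp only [List.nil_append]
    unfold occSpec
    apply List.map_congr_left
    intro k _
    congr 1
    omega
  rw [e1]
  have hoccD : ∀ j : Nat, j < 26 →
      PySem.List.pyGetD (List.map (fun j => occSpec cs j) (List.range 26)) (j : Int) []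
        = occSpec cs j := by
    intro j hj
    rw [getD_nat _ j _ (by simp [hj])]
    simp
  rw [List.map_map]
  apply map_range_congr
  intro r hr
  simp only [Function.comp_apply]
  rw [List.map_map]
  unfold rowA
  apply map_range_congr
  intro j hj
  simp only [Function.comp_apply]
  rw [hoccD j hj]
  rw [← cell_eq cs j r]
  by_cases hlt : lowerB (occSpec cs j) (r : Int) 0 (occSpec cs j).length < (occSpec cs j).length
  · rw [if_pos hlt, if_pos hlt, getD_nat _ _ _ hlt, List.getD_eq_getElem _ _ hlt]
  · rw [if_neg hlt, if_neg hlt]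

theorem midA_zero (cs : List Char) :
    midA cs 0 = (List.range (cs.length + 1)).map (fun r => rowA cs r) := by
  unfold midA
  apply map_range_congr
  intro r hr
  rw [if_pos (Nat.zero_le r)]

theorem pre_elim (S : String) (h : Pre_calcNext S) :
    ∀ c ∈ S.toList, 71 ≤ c.toNat ∧ c.toNat ≤ 122 := by
  unfold Pre_calcNext at h
  rw [List.all_eq_true] at h
  intro c hc
  have hm : c ∈ (pvUpperZone ++ pvLowerZone).toList := by simpa using h c hc
  have hall : ((pvUpperZone ++ pvLowerZone).toList.all
      (fun c => 71 ≤ c.toNat && c.toNat ≤ 122)) = true := by decide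
  rw [List.all_eq_true] at hall
  simpa using hall c hm

-- ===== VERDICT (by name: the statement is the Claim_ definition above) =====
theorem calcNext_spec : Claim_equal_calcNext := by
  intro S _ hPre
  unfold Spec_calcNext
  have hpre' := pre_elim S hPre
  rw [calcNext_char S hpre', midA_zero, ← calcNext_alt_char S hpre']
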